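-- pv_equiv track=rewrite | github.com/hroudaadam/Playground | python-randoms/akronym.py | acronym
-- ===== SOURCE A (Python) =====
-- def acronym(text):
--     predchozi_mezera = True
--     acronym_text = ""
--     for c in text:
--         if c == " ":
--             predchozi_mezera = True
--         elif predchozi_mezera:
--             acronym_text += c
--             predchozi_mezera = False
--         else:
--             predchozi_mezera = False
--     return acronym_text.upper()
-- ===== SOURCE B (Python) =====
-- def acronym(text):
--     # Pair each character with its predecessor (sentinel space at the start):
--     # keep the non-space characters that follow a space, then upper-case.
--     return "".join(c for p, c in zip(" " + text, text) if c != " " and p == " ").upper()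
-- ===== Notes on version B (the rewrite author's own statement) =====
-- stated objective: idiomatic
-- what changed: Replaces A's explicit previous-was-space state machine with a stateless one-liner that zips each character with its predecessor (space sentinel in front) and joins the non-space characters that follow a space.
import Mathlib
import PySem

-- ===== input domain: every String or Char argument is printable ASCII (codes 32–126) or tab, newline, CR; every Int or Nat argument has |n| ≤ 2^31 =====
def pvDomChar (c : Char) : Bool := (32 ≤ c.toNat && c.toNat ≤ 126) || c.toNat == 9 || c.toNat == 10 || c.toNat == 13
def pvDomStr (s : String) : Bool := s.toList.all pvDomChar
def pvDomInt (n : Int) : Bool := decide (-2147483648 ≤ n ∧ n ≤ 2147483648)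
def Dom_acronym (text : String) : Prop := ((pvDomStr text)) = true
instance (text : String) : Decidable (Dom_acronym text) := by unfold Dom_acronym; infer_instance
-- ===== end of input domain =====

-- B replaces A's previous-was-space state machine by a stateless zip-with-predecessor pass (idiomatic; same behaviour).

-- ===== PORT A =====
-- the for-loop over the characters, state = (predchozi_mezera, acronym_text)
def acronymLoop : List Char → Bool → List Char → List Char
  | [], _, acc => acc
  | c :: rest, prev, acc =>
    if c = ' ' then acronymLoop rest true acc
    else if prev then acronymLoop rest false (acc ++ [c])
    else acronymLoop rest false acc

def acronym (text : String) : String :=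
  String.ofList (PySem.Chars.upper (acronymLoop text.toList true []))

-- ===== PORT B =====
-- "".join(c for p, c in zip(" " + text, text) if c != " " and p == " ").upper()
def acronym_alt (text : String) : String :=
  String.ofList (PySem.Chars.upper
    (((' ' :: text.toList).zip text.toList).filterMap
      (fun pc => if pc.2 ≠ ' ' ∧ pc.1 = ' ' then some pc.2 else none)))

-- ===== PRECONDITION & SPEC =====
def Spec_acronym (text : String) (out : String) : Prop := out = acronym_alt text
instance (text : String) (out : String) : Decidable (Spec_acronym text out) := by unfold Spec_acronym; infer_instance

-- ===== CLAIM (what is proved, stated in full; the proofs are below) =====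
def Claim_equal_acronym : Prop := ∀ (text : String), Dom_acronym text → Spec_acronym text (acronym text)

-- ===== LEMMAS AND PROOFS =====

-- B's selection from the zip, as a function of the predecessor character
def pickZip (p : Char) (cs : List Char) : List Char :=
  ((p :: cs).zip cs).filterMap (fun pc => if pc.2 ≠ ' ' ∧ pc.1 = ' ' then some pc.2 else none)

lemma pickZip_cons (p c : Char) (cs : List Char) :
    pickZip p (c :: cs) = (if c ≠ ' ' ∧ p = ' ' then [c] else []) ++ pickZip c cs := by
  simp only [pickZip, List.zip_cons_cons, List.filterMap_cons]
  split_ifs <;> simp_all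

lemma acronymLoop_eq_pickZip (cs : List Char) (p : Char) (acc : List Char) :
    acronymLoop cs (decide (p = ' ')) acc = acc ++ pickZip p cs := by
  induction cs generalizing p acc with
  | nil => simp [acronymLoop, pickZip]
  | cons c rest ih =>
    rw [pickZip_cons]
    by_cases hc : c = ' '
    · subst hc
      simpa [acronymLoop] using ih ' ' acc
    · by_cases hp : p = ' '
      · have := ih c (acc ++ [c])
        simp [acronymLoop, hc, hp] at this ⊢
        simpa [hc] using this
      · have := ih c acc
        simp [acronymLoop, hc, hp] at this ⊢
        simpa [hc] using this

-- ===== VERDICT (by name: the statement is the Claim_ definition above) =====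
theorem acronym_spec : Claim_equal_acronym := by
  intro text _
  unfold Spec_acronym acronym acronym_alt
  rw [show (true : Bool) = decide (' ' = ' ') by decide, acronymLoop_eq_pickZip]
  rfl
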